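-- pv_equiv track=rewrite | github.com/P4C-M4N/2048 | Game/Game.py | retirerZeroBas
-- ===== SOURCE A (Python) =====
-- def creerGrilleTempo():
--     grilleTempo = [
--         [-1, -1, -1, -1],
--         [-1, -1, -1, -1],
--         [-1, -1, -1, -1],
--         [-1, -1, -1, -1]
--     ]
--     return grilleTempo
--
-- def retirerZeroBas(grille):
--   grilleTempo = creerGrilleTempo()
--   for colonne in range(0, 4):
--       idLigne = 3
--       for ligne in range(3, -1, -1):
--           if grille[ligne][colonne] != 0:
--               grilleTempo[idLigne][colonne] = grille[ligne][colonne]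
--               idLigne -= 1
--   return grilleTempo
-- ===== SOURCE B (Python) =====
-- def retirerZeroBas(grille):
--     cols = []
--     for c in range(4):
--         vals = [grille[l][c] for l in range(4) if grille[l][c] != 0]
--         cols.append([-1] * (4 - len(vals)) + vals)
--     return [[cols[c][r] for c in range(4)] for r in range(4)]
-- ===== Notes on version B (the rewrite author's own statement) =====
-- stated objective: simpler
-- what changed: Replaces A's in-place write-pointer pass over a preallocated -1 grid (reversed row scan with a decrementing row index per column) by a gather-pad-transpose pipeline: collect each column's nonzeros top-to-bottom, left-pad with -1 to height 4, and transpose the four columns back into rows.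
import Mathlib
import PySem

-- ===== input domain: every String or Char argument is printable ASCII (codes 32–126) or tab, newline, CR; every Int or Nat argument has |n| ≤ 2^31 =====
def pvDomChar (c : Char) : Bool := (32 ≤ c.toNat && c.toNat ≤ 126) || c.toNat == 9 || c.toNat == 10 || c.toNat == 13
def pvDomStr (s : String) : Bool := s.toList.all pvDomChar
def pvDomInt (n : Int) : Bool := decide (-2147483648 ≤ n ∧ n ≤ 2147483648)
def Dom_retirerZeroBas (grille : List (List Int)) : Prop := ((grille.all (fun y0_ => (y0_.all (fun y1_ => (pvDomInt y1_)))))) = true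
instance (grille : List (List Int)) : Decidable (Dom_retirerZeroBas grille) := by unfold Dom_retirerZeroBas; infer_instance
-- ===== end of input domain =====

-- B replaces A's in-place write-pointer pass by a gather-pad-transpose pipeline; same value on every grid A accepts.

-- ===== PORT A =====
-- literal port of creerGrilleTempo
def creerGrilleTempo : List (List Int) :=
  [[-1, -1, -1, -1], [-1, -1, -1, -1], [-1, -1, -1, -1], [-1, -1, -1, -1]]

-- grille[ligne][colonne]; total pyGetD form, exact under Pre_ (all indices are 0..3 and Pre_ gives lengths ≥ 4)
def pvCell (grille : List (List Int)) (ligne colonne : Int) : Int :=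
  PySem.List.pyGetD (PySem.List.pyGetD grille ligne []) colonne 0

-- grilleTempo[idLigne][colonne] = v; exact: idLigne only takes values 0..3 and tempo rows have length 4
def pvSetCell (tempo : List (List Int)) (idLigne colonne : Int) (v : Int) : List (List Int) :=
  PySem.List.pySetD tempo idLigne
    (PySem.List.pySetD (PySem.List.pyGetD tempo idLigne []) colonne v)

def retirerZeroBas (grille : List (List Int)) : List (List Int) :=
  (PySem.List.pyRange 0 4 1).foldl (fun grilleTempo colonne =>
    ((PySem.List.pyRange 3 (-1) (-1)).foldl
      (fun (st : List (List Int) × Int) ligne =>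
        if pvCell grille ligne colonne ≠ 0 then
          (pvSetCell st.1 st.2 colonne (pvCell grille ligne colonne), st.2 - 1)
        else st)
      (grilleTempo, 3)).1)
    creerGrilleTempo

-- ===== PORT B =====
def retirerZeroBas_alt (grille : List (List Int)) : List (List Int) :=
  let cols := (PySem.List.pyRange 0 4 1).map (fun c =>
    let vals := ((PySem.List.pyRange 0 4 1).filter
        (fun l => pvCell grille l c ≠ 0)).map (fun l => pvCell grille l c)
    List.replicate (4 - vals.length) (-1) ++ vals)
  (PySem.List.pyRange 0 4 1).map (fun r =>
    (PySem.List.pyRange 0 4 1).map (fun c =>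
      PySem.List.pyGetD (PySem.List.pyGetD cols c []) r 0))

-- ===== PRECONDITION & SPEC =====
-- Exactly the inputs on which the Python A returns: it reads grille[l][c] for all l, c in 0..3,
-- so it raises IndexError unless the grid has ≥ 4 rows whose first four rows have ≥ 4 entries.
def Pre_retirerZeroBas (grille : List (List Int)) : Prop :=
  4 ≤ grille.length ∧ ∀ r ∈ grille.take 4, 4 ≤ r.length
instance (grille : List (List Int)) : Decidable (Pre_retirerZeroBas grille) := by
  unfold Pre_retirerZeroBas; infer_instance

def pvWitness_retirerZeroBas : List (List Int) :=
  [[0, 2, 0, 0], [2, 0, 0, 0], [0, 0, 4, 2], [2, 2, 2, 2]]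

def Spec_retirerZeroBas (grille : List (List Int)) (out : List (List Int)) : Prop := out = retirerZeroBas_alt grille
instance (grille : List (List Int)) (out : List (List Int)) : Decidable (Spec_retirerZeroBas grille out) := by unfold Spec_retirerZeroBas; infer_instance

-- ===== CLAIM (what is proved, stated in full; the proofs are below) =====
def Claim_equal_retirerZeroBas : Prop := ∀ (grille : List (List Int)), Dom_retirerZeroBas grille → Pre_retirerZeroBas grille → Spec_retirerZeroBas grille (retirerZeroBas grille)

-- ===== LEMMAS AND PROOFS =====

-- B's padded column c, exactly as retirerZeroBas_alt builds it
def pvPack (grille : List (List Int)) (c : Int) : List Int :=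
  let vals := (([0, 1, 2, 3] : List Int).filter
      (fun l => pvCell grille l c ≠ 0)).map (fun l => pvCell grille l c)
  List.replicate (4 - vals.length) (-1) ++ vals

-- write v at column c of a row unless v is the -1 padding
def pvUpd (t : List Int) (c v : Int) : List Int :=
  if v = -1 then t else PySem.List.pySetD t c v

theorem pyRange04 : PySem.List.pyRange 0 4 1 = [0, 1, 2, 3] := by decide
theorem pyRange3m1 : PySem.List.pyRange 3 (-1) (-1) = [3, 2, 1, 0] := by decide

theorem pvG4_0 {α : Type} (a b c d e : α) : PySem.List.pyGetD [a, b, c, d] 0 e = a := by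
  simp [PySem.List.pyGetD, PySem.List.pyGet?, PySem.List.pyIdx?]
theorem pvG4_1 {α : Type} (a b c d e : α) : PySem.List.pyGetD [a, b, c, d] 1 e = b := by
  simp [PySem.List.pyGetD, PySem.List.pyGet?, PySem.List.pyIdx?]
theorem pvG4_2 {α : Type} (a b c d e : α) : PySem.List.pyGetD [a, b, c, d] 2 e = c := by
  simp [PySem.List.pyGetD, PySem.List.pyGet?, PySem.List.pyIdx?]
theorem pvG4_3 {α : Type} (a b c d e : α) : PySem.List.pyGetD [a, b, c, d] 3 e = d := by
  simp [PySem.List.pyGetD, PySem.List.pyGet?, PySem.List.pyIdx?]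
theorem pvS4_0 {α : Type} (a b c d v : α) : PySem.List.pySetD [a, b, c, d] 0 v = [v, b, c, d] := by
  simp [PySem.List.pySetD, PySem.List.pySet?, PySem.List.pyIdx?]
theorem pvS4_1 {α : Type} (a b c d v : α) : PySem.List.pySetD [a, b, c, d] 1 v = [a, v, c, d] := by
  simp [PySem.List.pySetD, PySem.List.pySet?, PySem.List.pyIdx?]
theorem pvS4_2 {α : Type} (a b c d v : α) : PySem.List.pySetD [a, b, c, d] 2 v = [a, b, v, d] := by
  simp [PySem.List.pySetD, PySem.List.pySet?, PySem.List.pyIdx?]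
theorem pvS4_3 {α : Type} (a b c d v : α) : PySem.List.pySetD [a, b, c, d] 3 v = [a, b, c, v] := by
  simp [PySem.List.pySetD, PySem.List.pySet?, PySem.List.pyIdx?]

set_option maxHeartbeats 1000000 in
theorem innerL (grille : List (List Int)) (c : Int) (t0 t1 t2 t3 : List Int)
    (h0 : PySem.List.pySetD t0 c (-1) = t0) (h1 : PySem.List.pySetD t1 c (-1) = t1)
    (h2 : PySem.List.pySetD t2 c (-1) = t2) (h3 : PySem.List.pySetD t3 c (-1) = t3) :
    ((PySem.List.pyRange 3 (-1) (-1)).foldl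
      (fun (st : List (List Int) × Int) ligne =>
        if pvCell grille ligne c ≠ 0 then
          (pvSetCell st.1 st.2 c (pvCell grille ligne c), st.2 - 1)
        else st)
      ([t0, t1, t2, t3], 3)).1
    = [pvUpd t0 c (PySem.List.pyGetD (pvPack grille c) 0 0),
       pvUpd t1 c (PySem.List.pyGetD (pvPack grille c) 1 0),
       pvUpd t2 c (PySem.List.pyGetD (pvPack grille c) 2 0),
       pvUpd t3 c (PySem.List.pyGetD (pvPack grille c) 3 0)] := by
  rw [pyRange3m1]
  by_cases e0 : pvCell grille 0 c = 0 <;> by_cases e1 : pvCell grille 1 c = 0 <;>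
    by_cases e2 : pvCell grille 2 c = 0 <;> by_cases e3 : pvCell grille 3 c = 0 <;>
    simp only [List.foldl_cons, List.foldl_nil] <;>
    simp only [pvPack, pvUpd, pvSetCell, e0, e1, e2, e3, List.filter, List.map,
      decide_true, decide_false, ne_eq, not_true_eq_false, not_false_eq_true,
      if_pos, if_neg] <;>
    simp [pvG4_1, pvG4_2, pvG4_3, pvS4_0, pvS4_1, pvS4_2, pvS4_3,
      List.replicate] <;>
    (repeat' apply And.intro) <;> (intro hv; rw [hv]; assumption)

theorem updNil0 (v : Int) : pvUpd [-1, -1, -1, -1] 0 v = [v, -1, -1, -1] := by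
  by_cases h : v = -1 <;> simp [pvUpd, PySem.List.pySetD, PySem.List.pySet?, PySem.List.pyIdx?, h]
theorem updNil1 (a v : Int) : pvUpd [a, -1, -1, -1] 1 v = [a, v, -1, -1] := by
  by_cases h : v = -1 <;> simp [pvUpd, PySem.List.pySetD, PySem.List.pySet?, PySem.List.pyIdx?, h]
theorem updNil2 (a b v : Int) : pvUpd [a, b, -1, -1] 2 v = [a, b, v, -1] := by
  by_cases h : v = -1 <;> simp [pvUpd, PySem.List.pySetD, PySem.List.pySet?, PySem.List.pyIdx?, h]
theorem updNil3 (a b c v : Int) : pvUpd [a, b, c, -1] 3 v = [a, b, c, v] := by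
  by_cases h : v = -1 <;> simp [pvUpd, PySem.List.pySetD, PySem.List.pySet?, PySem.List.pyIdx?, h]

-- ===== VERDICT (by name: the statement is the Claim_ definition above) =====
theorem retirerZeroBas_spec : Claim_equal_retirerZeroBas := by
  intro grille _ _
  unfold Spec_retirerZeroBas retirerZeroBas retirerZeroBas_alt creerGrilleTempo
  rw [pyRange04]
  simp only [List.foldl_cons, List.foldl_nil, List.map_cons, List.map_nil]
  rw [innerL grille 0 _ _ _ _ (pvS4_0 (-1) (-1) (-1) (-1) (-1)) (pvS4_0 (-1) (-1) (-1) (-1) (-1))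
      (pvS4_0 (-1) (-1) (-1) (-1) (-1)) (pvS4_0 (-1) (-1) (-1) (-1) (-1))]
  simp only [updNil0]
  rw [innerL grille 1 _ _ _ _ (pvS4_1 _ (-1) (-1) (-1) (-1)) (pvS4_1 _ (-1) (-1) (-1) (-1))
      (pvS4_1 _ (-1) (-1) (-1) (-1)) (pvS4_1 _ (-1) (-1) (-1) (-1))]
  simp only [updNil1]
  rw [innerL grille 2 _ _ _ _ (pvS4_2 _ _ (-1) (-1) (-1)) (pvS4_2 _ _ (-1) (-1) (-1))
      (pvS4_2 _ _ (-1) (-1) (-1)) (pvS4_2 _ _ (-1) (-1) (-1))]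
  simp only [updNil2]
  rw [innerL grille 3 _ _ _ _ (pvS4_3 _ _ _ (-1) (-1)) (pvS4_3 _ _ _ (-1) (-1))
      (pvS4_3 _ _ _ (-1) (-1)) (pvS4_3 _ _ _ (-1) (-1))]
  simp only [updNil3]
  simp only [pvG4_0, pvG4_1, pvG4_2, pvG4_3]
  simp only [pvPack]
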